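-- pv_equiv track=rewrite | github.com/Adlona28/yahoo-basketball-fantasy-tool | dataCleaner/weeklyStats.py | getAllWins
-- ===== SOURCE A (Python) =====
-- def compare_team_positions(rankings, team1, team2):
--
--     team1_count = sum(rankings[stat].index(team1) < rankings[stat].index(team2) for stat in rankings)
--     team2_count = sum(rankings[stat].index(team2) < rankings[stat].index(team1) for stat in rankings)
--
--     if team1_count > team2_count:
--         return team1
--     elif team2_count > team1_count:
--         return team2
--     else:
--         return "Tie"
--
-- def getAllWins(rankings, team_names):
--     winningSets = {team: set() for team in team_names}
--
--     for team in team_names: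
--         for other_team in team_names:
--             if team == other_team:
--                 continue
--
--             better_team = compare_team_positions(rankings, team, other_team)
--             if better_team == team:
--                 winningSets[team].add(other_team)
--
--     return winningSets
-- ===== SOURCE B (Python) =====
-- def getAllWins(rankings, team_names):
--     teams = list(dict.fromkeys(team_names))
--     pairs = [(t1, t2) for t1 in teams for t2 in teams if t1 != t2]
--     wins = {pair: 0 for pair in pairs}
--     for ranking in rankings.values():
--         pos = {}
--         for i, t in enumerate(ranking):
--             pos.setdefault(t, i)
--         for (t1, t2) in pairs:
--             if pos[t1] < pos[t2]:
--                 wins[(t1, t2)] += 1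
--     return {t: {u for u in teams if u != t and wins[(t, u)] > wins[(u, t)]}
--             for t in teams}
-- ===== Notes on version B (the rewrite author's own statement) =====
-- stated objective: faster
-- what changed: Replaces A's per-pair recomputation (four list .index scans per stat for every ordered pair of teams) by three phases: build a per-stat first-occurrence position dict once per stat, accumulate a pairwise win-count matrix stat by stat, then a separate decide pass that reads the matrix.
-- intended difference: On inputs where a team is literally named "Tie" and some opponent's stat comparison against it ends level, A's sentinel string "Tie" equals that team's name, so A wrongly counts the tied opponent as beaten by team "Tie"; B records no win on a level comparison, which is the intended majority rule. — e.g. on getAllWins([], ["Tie", "A"]): A returns [("Tie", ["A"]), ("A", [])], B returns [("Tie", []), ("A", [])]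
import Mathlib
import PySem

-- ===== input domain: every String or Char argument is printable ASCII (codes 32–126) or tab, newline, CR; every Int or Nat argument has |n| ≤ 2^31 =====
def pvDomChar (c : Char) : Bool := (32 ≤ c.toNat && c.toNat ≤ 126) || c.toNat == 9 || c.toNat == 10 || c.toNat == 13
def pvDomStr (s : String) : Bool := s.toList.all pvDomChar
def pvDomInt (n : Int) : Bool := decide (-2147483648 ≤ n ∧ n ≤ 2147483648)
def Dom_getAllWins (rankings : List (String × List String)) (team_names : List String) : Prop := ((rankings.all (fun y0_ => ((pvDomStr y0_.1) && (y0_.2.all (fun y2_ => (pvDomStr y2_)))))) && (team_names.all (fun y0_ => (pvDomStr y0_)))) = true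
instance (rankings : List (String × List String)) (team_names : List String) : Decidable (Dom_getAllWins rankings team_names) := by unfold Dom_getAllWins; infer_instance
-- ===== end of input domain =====

-- B replaces A's per-pair rescanning of every ranking by a three-phase build/accumulate/decide
-- pass: per-stat first-occurrence position dicts, a pairwise win-count matrix, then a decide
-- pass reading the matrix (objective: faster; return value only — no argument is mutated).

-- ===== PORT A =====
-- list.index(v), total form: exact whenever v is a member (Python raises ValueError when absent;
-- Pre_ guarantees membership wherever A evaluates it)
def pvIdx (xs : List String) (v : String) : Nat := (PySem.List.index? xs v).getD 0

def compareTeamPositions (rd : PySem.Dict String (List String)) (team1 team2 : String) : String :=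
  let team1_count : Nat := rd.keys.foldl
    (fun acc stat => acc + (if pvIdx (rd.getD stat []) team1 < pvIdx (rd.getD stat []) team2 then 1 else 0)) 0
  let team2_count : Nat := rd.keys.foldl
    (fun acc stat => acc + (if pvIdx (rd.getD stat []) team2 < pvIdx (rd.getD stat []) team1 then 1 else 0)) 0
  if team1_count > team2_count then team1
  else if team2_count > team1_count then team2
  else "Tie"

def getAllWins (rankings : List (String × List String)) (team_names : List String) : List (String × List String) :=
  let rd : PySem.Dict String (List String) := PySem.Dict.ofList rankings
  let winningSets : PySem.Dict String (PySem.Set String) :=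
    team_names.foldl (fun d team => d.insert team ([] : PySem.Set String)) PySem.Dict.empty
  let winningSets :=
    team_names.foldl (fun d team =>
      team_names.foldl (fun d other_team =>
        if team == other_team then d
        else if compareTeamPositions rd team other_team == team then
          d.modify team [] (fun s => PySem.Set.add s other_team)
        else d) d) winningSets
  winningSets.items

-- ===== PORT B =====
def pvPairs (teams : List String) : List (String × String) :=
  teams.flatMap (fun t1 => (teams.filter (fun t2 => !(t1 == t2))).map (fun t2 => (t1, t2)))

-- pos = {}; for i, t in enumerate(ranking): pos.setdefault(t, i)
def pvPosOf (ranking : List String) : PySem.Dict String Int :=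
  (PySem.List.enumerate ranking).foldl (fun p it => p.setdefault it.2 it.1) PySem.Dict.empty

-- pos[t] ported as getD: exact on Pre_, where every pair component is a key of pos
def getAllWins_alt (rankings : List (String × List String)) (team_names : List String) : List (String × List String) :=
  let rd : PySem.Dict String (List String) := PySem.Dict.ofList rankings
  let teams : List String := PySem.List.dedup team_names
  let pairs : List (String × String) := pvPairs teams
  let wins0 : PySem.Dict (String × String) Nat :=
    pairs.foldl (fun w pr => w.insert pr 0) PySem.Dict.empty
  let wins : PySem.Dict (String × String) Nat :=
    rd.values.foldl (fun w ranking =>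
      let pos : PySem.Dict String Int := pvPosOf ranking
      pairs.foldl (fun w pr =>
        if pos.getD pr.1 0 < pos.getD pr.2 0 then w.modify pr 0 (· + 1) else w) w) wins0
  teams.map (fun t =>
    (t, PySem.Set.ofList (teams.filter (fun u => (!(u == t)) && decide (wins.getD (u, t) 0 < wins.getD (t, u) 0)))))

-- ===== PRECONDITION & SPEC =====
-- number of stat rankings that place t strictly before u (used by D_ below)
def pvCnt (rankings : List (String × List String)) (t u : String) : Nat :=
  List.countP (fun r => decide (((PySem.List.index? r t).getD 0) < ((PySem.List.index? r u).getD 0)))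
    (PySem.Dict.ofList rankings).values

-- Pre_ is exactly A's return domain: A raises ValueError precisely when there are at least two
-- distinct team names (so compare_team_positions runs) and some listed team is missing from some
-- stat ranking; Pre_ admits everything else.
def Pre_getAllWins (rankings : List (String × List String)) (team_names : List String) : Prop :=
  (PySem.List.dedup team_names).length ≤ 1 ∨
  ∀ lst ∈ (PySem.Dict.ofList rankings).values, ∀ t ∈ team_names, t ∈ lst
instance (rankings : List (String × List String)) (team_names : List String) : Decidable (Pre_getAllWins rankings team_names) := by unfold Pre_getAllWins; infer_instance

def pvWitness_getAllWins : (List (String × List String)) × List String :=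
  ([("pts", ["A", "B", "C"]), ("reb", ["B", "A", "C"]), ("ast", ["A", "C", "B"])], ["A", "B", "C"])

-- On inputs where a team is literally named "Tie" and some stat-ranking comparison against it ends
-- level, A's sentinel string "Tie" collides with that team name and A wrongly credits the tied
-- opponent to team "Tie"'s set of beaten teams; B records no win on a level comparison, which is
-- the intended majority rule.
def D_getAllWins (rankings : List (String × List String)) (team_names : List String) : Prop :=
  "Tie" ∈ team_names ∧ ∃ u ∈ team_names, u ≠ "Tie" ∧ pvCnt rankings "Tie" u = pvCnt rankings u "Tie"
instance (rankings : List (String × List String)) (team_names : List String) : Decidable (D_getAllWins rankings team_names) := by unfold D_getAllWins; infer_instance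

def Spec_getAllWins (rankings : List (String × List String)) (team_names : List String) (out : List (String × List String)) : Prop :=
  ¬ D_getAllWins rankings team_names → out = getAllWins_alt rankings team_names
instance (rankings : List (String × List String)) (team_names : List String) (out : List (String × List String)) : Decidable (Spec_getAllWins rankings team_names out) := by unfold Spec_getAllWins; infer_instance

def pvDiffWitness_getAllWins : (List (String × List String)) × List String :=
  ([], ["Tie", "A"])
def pvDiffWitnessOut_getAllWins : (List (String × List String)) × (List (String × List String)) :=
  ([("Tie", ["A"]), ("A", [])], [("Tie", []), ("A", [])])

-- ===== CLAIM (what is proved, stated in full; the proofs are below) =====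
def Claim_unchanged_getAllWins : Prop := ∀ (rankings : List (String × List String)) (team_names : List String), Dom_getAllWins rankings team_names → Pre_getAllWins rankings team_names → Spec_getAllWins rankings team_names (getAllWins rankings team_names)
def Claim_changed_getAllWins : Prop := Dom_getAllWins (pvDiffWitness_getAllWins.1) (pvDiffWitness_getAllWins.2) ∧ Pre_getAllWins (pvDiffWitness_getAllWins.1) (pvDiffWitness_getAllWins.2) ∧ D_getAllWins (pvDiffWitness_getAllWins.1) (pvDiffWitness_getAllWins.2) ∧ getAllWins (pvDiffWitness_getAllWins.1) (pvDiffWitness_getAllWins.2) = pvDiffWitnessOut_getAllWins.1 ∧ getAllWins_alt (pvDiffWitness_getAllWins.1) (pvDiffWitness_getAllWins.2) = pvDiffWitnessOut_getAllWins.2 ∧ pvDiffWitnessOut_getAllWins.1 ≠ pvDiffWitnessOut_getAllWins.2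
def Claim_exact_getAllWins : Prop := ∀ (rankings : List (String × List String)) (team_names : List String), Dom_getAllWins rankings team_names → Pre_getAllWins rankings team_names → D_getAllWins rankings team_names → getAllWins rankings team_names ≠ getAllWins_alt rankings team_names

-- ===== LEMMAS AND PROOFS =====

-- counting loops: sum of 0/1 indicators is countP
theorem pv_foldl_add_count {α : Type} (q : α → Prop) [DecidablePred q] :
    ∀ (l : List α) (n : Nat),
      l.foldl (fun acc x => acc + (if q x then 1 else 0)) n = n + l.countP (fun x => decide (q x)) := by
  intro l
  induction l with
  | nil => intro n; simp
  | cons x l ih =>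
    intro n
    by_cases h : q x <;> simp [h, ih] <;> omega

-- A's per-stat comparison count equals pvCnt
theorem pv_c1_eq_pvCnt (rankings : List (String × List String)) (t u : String) :
    (PySem.Dict.ofList rankings).keys.foldl
      (fun acc stat => acc + (if pvIdx ((PySem.Dict.ofList rankings).getD stat []) t <
                                 pvIdx ((PySem.Dict.ofList rankings).getD stat []) u then 1 else 0)) 0
      = pvCnt rankings t u := by
  rw [pv_foldl_add_count (fun stat => pvIdx ((PySem.Dict.ofList rankings).getD stat []) t <
        pvIdx ((PySem.Dict.ofList rankings).getD stat []) u)]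
  rw [Nat.zero_add]
  unfold pvCnt
  rw [PySem.Dict.values_eq_map_keys _ (PySem.Dict.nodup_keys_ofList rankings) ([] : List String)]
  rw [List.countP_map]
  rfl

-- a fold of inserts whose value depends only on the key
theorem pv_getD_foldl_insert_fun {κ ν : Type} [BEq κ] [LawfulBEq κ] [DecidableEq κ] (f : κ → ν) :
    ∀ (l : List κ) (d : PySem.Dict κ ν) (k : κ) (dflt : ν),
      (l.foldl (fun d x => d.insert x (f x)) d).getD k dflt = if k ∈ l then f k else d.getD k dflt := by
  intro l
  induction l with
  | nil => intro d k dflt; simp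
  | cons x l ih =>
    intro d k dflt
    simp only [List.foldl_cons]
    rw [ih]
    by_cases h : k ∈ l
    · simp [h]
    · by_cases hx : k = x <;> simp [h, hx, PySem.Dict.getD_insert]

-- one accumulate pass over the pair list
theorem pv_modify_count {κ : Type} [BEq κ] [LawfulBEq κ] [DecidableEq κ] (q : κ → Prop) [DecidablePred q] :
    ∀ (l : List κ) (w : PySem.Dict κ Nat) (k : κ),
      (l.foldl (fun w x => if q x then w.modify x 0 (· + 1) else w) w).getD k 0
        = w.getD k 0 + (if q k then l.count k else 0) := by
  intro l
  induction l with
  | nil => intro w k; simp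
  | cons x l ih =>
    intro w k
    simp only [List.foldl_cons]
    by_cases hq : q x
    · rw [if_pos hq, ih]
      by_cases hk : k = x
      · subst hk
        rw [PySem.Dict.getD_modify]
        simp [hq]
        omega
      · rw [PySem.Dict.getD_modify, if_neg hk]
        by_cases hqk : q k <;> simp [hqk, List.count_cons, Ne.symm hk]
    · rw [if_neg hq, ih]
      by_cases hqk : q k
      · have hk : k ≠ x := fun h => hq (h ▸ hqk)
        simp [hqk, List.count_cons, Ne.symm hk]
      · simp [hqk]

theorem pv_wins_fold (prs : List (String × String)) :
    ∀ (ps : List (PySem.Dict String Int)) (w : PySem.Dict (String × String) Nat) (k : String × String),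
      (ps.foldl (fun w pos =>
          prs.foldl (fun w pr =>
            if pos.getD pr.1 0 < pos.getD pr.2 0 then w.modify pr 0 (· + 1) else w) w) w).getD k 0
        = w.getD k 0 + prs.count k * ps.countP (fun pos => decide (pos.getD k.1 0 < pos.getD k.2 0)) := by
  intro ps
  induction ps with
  | nil => intro w k; simp
  | cons pos ps ih =>
    intro w k
    simp only [List.foldl_cons]
    rw [ih]
    rw [pv_modify_count (fun pr => pos.getD pr.1 0 < pos.getD pr.2 0) prs w k]
    by_cases h : pos.getD k.1 0 < pos.getD k.2 0 <;>
      simp [h, List.countP_cons, Nat.mul_add] <;> omega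

theorem pv_mem_pairs (teams : List String) (p : String × String) :
    p ∈ pvPairs teams ↔ p.1 ∈ teams ∧ p.2 ∈ teams ∧ p.1 ≠ p.2 := by
  obtain ⟨a, b⟩ := p
  simp only [pvPairs, List.mem_flatMap, List.mem_map, List.mem_filter, Prod.mk.injEq]
  constructor
  · rintro ⟨t1, h1, t2, ⟨h2, hne⟩, rfl, rfl⟩
    refine ⟨h1, h2, ?_⟩
    simpa using hne
  · rintro ⟨ha, hb, hne⟩
    refine ⟨a, ha, b, ⟨hb, ?_⟩, rfl, rfl⟩
    simpa using hne

theorem pv_nodup_pairs (teams : List String) (h : teams.Nodup) : (pvPairs teams).Nodup := by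
  unfold pvPairs
  have aux : ∀ (os : List String), os.Nodup →
      (os.flatMap (fun t1 => (teams.filter (fun t2 => !(t1 == t2))).map (fun t2 => (t1, t2)))).Nodup := by
    intro os
    induction os with
    | nil => intro _; simp
    | cons a os ih =>
      intro hnd
      rw [List.flatMap_cons, List.nodup_append]
      obtain ⟨hna, hnos⟩ := List.nodup_cons.mp hnd
      refine ⟨?_, ih hnos, ?_⟩
      · exact List.Nodup.map (fun x y hxy => by simpa using hxy) (h.filter _)
      · intro x hx y hy hxy
        subst hxy
        obtain ⟨t2, _, heq2⟩ := List.mem_map.mp hx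
        obtain ⟨t1, ht1, hmem⟩ := List.mem_flatMap.mp hy
        obtain ⟨t2', _, heq⟩ := List.mem_map.mp hmem
        have h1 : t1 = a := by
          have ha := congrArg Prod.fst heq
          have hb := congrArg Prod.fst heq2
          simp_all
        exact hna (h1 ▸ ht1)
  exact aux teams h

theorem pv_mem_foldl_add (l : List String) (s : PySem.Set String) (x : String) (h : x ∈ s) :
    x ∈ l.foldl PySem.Set.add s := by
  induction l generalizing s with
  | nil => exact h
  | cons a l ih =>
    simp only [List.foldl_cons]
    exact ih _ ((PySem.Set.mem_add s a x).mpr (Or.inl h))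

theorem pv_mem_foldl_add_of_mem (l : List String) (s : PySem.Set String) (x : String) (h : x ∈ l) :
    x ∈ l.foldl PySem.Set.add s := by
  induction l generalizing s with
  | nil => cases h
  | cons a l ih =>
    simp only [List.foldl_cons]
    rcases List.mem_cons.mp h with rfl | h'
    · exact pv_mem_foldl_add _ _ _ ((PySem.Set.mem_add s x x).mpr (Or.inr rfl))
    · exact ih _ h'

theorem pv_add_of_mem (s : PySem.Set String) (x : String) (h : x ∈ s) : PySem.Set.add s x = s := by
  simp [PySem.Set.add, PySem.Set.contains, h]

theorem pv_add_of_not_mem (s : PySem.Set String) (x : String) (h : ¬ x ∈ s) :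
    PySem.Set.add s x = s ++ [x] := by
  simp [PySem.Set.add, PySem.Set.contains, h]

theorem pv_foldl_add_of_subset (l : List String) (s : PySem.Set String) (h : ∀ x ∈ l, x ∈ s) :
    l.foldl PySem.Set.add s = s := by
  induction l with
  | nil => rfl
  | cons a l ih =>
    simp only [List.foldl_cons]
    rw [pv_add_of_mem s a (h a (List.mem_cons_self))]
    exact ih (fun x hx => h x (List.mem_cons_of_mem a hx))

theorem pv_foldl_add_idem (l : List String) (s : PySem.Set String) :
    l.foldl PySem.Set.add (l.foldl PySem.Set.add s) = l.foldl PySem.Set.add s := by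
  exact pv_foldl_add_of_subset l _ (fun x hx => pv_mem_foldl_add_of_mem l s x hx)

theorem pv_filter_foldl_add (q : String → Bool) :
    ∀ (l : List String) (s : PySem.Set String),
      (l.foldl PySem.Set.add s).filter q = (l.filter q).foldl PySem.Set.add (s.filter q) := by
  intro l
  induction l with
  | nil => intro s; rfl
  | cons x l ih =>
    intro s
    simp only [List.foldl_cons, List.filter_cons]
    rw [ih (s.add x)]
    by_cases hq : q x
    · simp only [hq, if_pos]
      simp only [List.foldl_cons]
      congr 1
      by_cases hx : x ∈ s
      · rw [pv_add_of_mem s x hx, pv_add_of_mem]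
        exact List.mem_filter.mpr ⟨hx, hq⟩
      · rw [pv_add_of_not_mem s x hx, List.filter_append, pv_add_of_not_mem]
        · simp [hq]
        · intro hmem; exact hx (List.mem_filter.mp hmem).1
    · simp only [hq]
      simp only [Bool.false_eq_true, if_false]
      congr 1
      by_cases hx : x ∈ s
      · rw [pv_add_of_mem s x hx]
      · rw [pv_add_of_not_mem s x hx, List.filter_append]
        simp [hq]

theorem pv_ofList_filter (q : String → Bool) (l : List String) :
    PySem.Set.ofList (l.filter q) = (PySem.List.dedup l).filter q := by
  rw [PySem.List.dedup_eq_ofList, PySem.Set.ofList_eq_foldl, PySem.Set.ofList_eq_foldl,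
    pv_filter_foldl_add]
  rfl

-- A's inner loop touches only the key `team`
theorem pv_innerA (rd : PySem.Dict String (List String)) (team : String) :
    ∀ (others : List String) (d : PySem.Dict String (PySem.Set String)) (k : String),
      (others.foldl (fun d other_team =>
          if team == other_team then d
          else if compareTeamPositions rd team other_team == team then
            d.modify team [] (fun s => PySem.Set.add s other_team)
          else d) d).getD k []
        = if k = team then
            (others.filter (fun u => (!(team == u)) && (compareTeamPositions rd team u == team))).foldl
              PySem.Set.add (d.getD team [])
          else d.getD k [] := by
  intro others
  induction others with
  | nil =>
    intro d k
    by_cases h : k = team <;> simp [h]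
  | cons other rest ih =>
    intro d k
    simp only [List.foldl_cons, List.filter_cons]
    by_cases h1 : (team == other) = true
    · rw [if_pos h1, ih]
      simp [h1]
    · by_cases h2 : (compareTeamPositions rd team other == team) = true
      · rw [if_neg h1, if_pos h2, ih]
        by_cases hk : k = team
        · subst hk
          rw [if_pos rfl, if_pos rfl, PySem.Dict.getD_modify, if_pos rfl]
          simp only [h1, h2]
          simp
        · rw [if_neg hk, if_neg hk, PySem.Dict.getD_modify, if_neg hk]
      · rw [if_neg h1, if_neg h2, ih]
        simp [h1, h2]

theorem pv_innerA_keys (rd : PySem.Dict String (List String)) (team : String) :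
    ∀ (others : List String) (d : PySem.Dict String (PySem.Set String)), team ∈ d.keys →
      (others.foldl (fun d other_team =>
          if team == other_team then d
          else if compareTeamPositions rd team other_team == team then
            d.modify team [] (fun s => PySem.Set.add s other_team)
          else d) d).keys = d.keys := by
  intro others
  induction others with
  | nil => intro d _; rfl
  | cons other rest ih =>
    intro d hmem
    simp only [List.foldl_cons]
    by_cases h1 : (team == other) = true
    · rw [if_pos h1]; exact ih d hmem
    · by_cases h2 : (compareTeamPositions rd team other == team) = true
      · rw [if_neg h1, if_pos h2]
        have hc : (d.modify team [] (fun s => PySem.Set.add s other)).keys = d.keys := by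
          rw [PySem.Dict.keys_modify, PySem.Dict.keys_insert_of_contains]
          exact (PySem.Dict.contains_iff_mem_keys d team).mpr hmem
        rw [ih _ (by rw [hc]; exact hmem), hc]
      · rw [if_neg h1, if_neg h2]; exact ih d hmem

-- A's outer loop, suffix form
theorem pv_outerA (rd : PySem.Dict String (List String)) (full : List String) :
    ∀ (ts : List String) (d : PySem.Dict String (PySem.Set String)) (k : String),
      (ts.foldl (fun d team =>
          full.foldl (fun d other_team =>
            if team == other_team then d
            else if compareTeamPositions rd team other_team == team then
              d.modify team [] (fun s => PySem.Set.add s other_team)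
            else d) d) d).getD k []
        = if k ∈ ts then
            (full.filter (fun u => (!(k == u)) && (compareTeamPositions rd k u == k))).foldl
              PySem.Set.add (d.getD k [])
          else d.getD k [] := by
  intro ts
  induction ts with
  | nil =>
    intro d k; simp
  | cons team ts ih =>
    intro d k
    simp only [List.foldl_cons]
    rw [ih]
    by_cases hk : k ∈ ts
    · rw [if_pos hk, if_pos (List.mem_cons_of_mem team hk)]
      rw [pv_innerA]
      by_cases hkt : k = team
      · subst hkt
        rw [if_pos rfl]
        exact pv_foldl_add_idem _ _
      · rw [if_neg hkt]
    · rw [if_neg hk, pv_innerA]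
      by_cases hkt : k = team
      · subst hkt
        rw [if_pos rfl, if_pos (List.mem_cons_self)]
      · rw [if_neg hkt, if_neg (by simp [hkt, hk])]

theorem pv_outerA_keys (rd : PySem.Dict String (List String)) (full : List String) :
    ∀ (ts : List String) (d : PySem.Dict String (PySem.Set String)), (∀ t ∈ ts, t ∈ d.keys) →
      (ts.foldl (fun d team =>
          full.foldl (fun d other_team =>
            if team == other_team then d
            else if compareTeamPositions rd team other_team == team then
              d.modify team [] (fun s => PySem.Set.add s other_team)
            else d) d) d).keys = d.keys := by
  intro ts
  induction ts with
  | nil => intro d _; rfl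
  | cons team ts ih =>
    intro d hmem
    simp only [List.foldl_cons]
    have hk := pv_innerA_keys rd team full d (hmem team (List.mem_cons_self))
    rw [ih _ (fun t ht => by rw [hk]; exact hmem t (List.mem_cons_of_mem team ht)), hk]

theorem pv_A_char (rankings : List (String × List String)) (team_names : List String) :
    getAllWins rankings team_names
      = (PySem.List.dedup team_names).map (fun t =>
          (t, PySem.Set.ofList (team_names.filter (fun u =>
                (!(t == u)) && (compareTeamPositions (PySem.Dict.ofList rankings) t u == t))))) := by
  simp only [getAllWins]
  set rd := PySem.Dict.ofList rankings with hrd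
  set w0 := team_names.foldl (fun d team => d.insert team ([] : PySem.Set String)) PySem.Dict.empty with hw0
  have hkeys0 : w0.keys = PySem.Set.ofList team_names := by
    rw [hw0, PySem.Dict.keys_foldl_insert]
    rw [PySem.Dict.keys_empty, PySem.Set.update_nil_left]
  have hgd0 : ∀ k, w0.getD k [] = [] := by
    intro k
    rw [hw0, pv_getD_foldl_insert_fun (fun _ => ([] : PySem.Set String))]
    by_cases h : k ∈ team_names <;> simp [h, PySem.Dict.getD_empty]
  set W := team_names.foldl (fun d team =>
      team_names.foldl (fun d other_team =>
        if team == other_team then d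
        else if compareTeamPositions rd team other_team == team then
          d.modify team [] (fun s => PySem.Set.add s other_team)
        else d) d) w0 with hW
  have hkeys : W.keys = PySem.Set.ofList team_names := by
    rw [hW, pv_outerA_keys rd team_names team_names w0
      (fun t ht => by rw [hkeys0]; exact (PySem.Set.mem_ofList _ _).mpr ht), hkeys0]
  have hnd : W.keys.Nodup := by rw [hkeys]; exact PySem.Set.nodup_ofList _
  rw [PySem.Dict.items_eq_map_keys _ hnd ([] : PySem.Set String), hkeys,
    ← PySem.List.dedup_eq_ofList]
  apply List.map_congr_left
  intro t ht
  have ht' : t ∈ team_names := (PySem.List.mem_dedup _ _).mp ht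
  have hval : W.getD t [] = PySem.Set.ofList (team_names.filter
      (fun u => (!(t == u)) && (compareTeamPositions rd t u == t))) := by
    rw [hW, pv_outerA rd team_names team_names w0 t, if_pos ht', hgd0 t,
      PySem.Set.ofList_eq_foldl]
  rw [hval]

-- B's per-stat position dict: setdefault keeps the FIRST occurrence, like list.index
theorem pv_setdefault_fold (t : String) : ∀ (ranking : List String) (s : Int) (d : PySem.Dict String Int),
    ((PySem.List.enumerate ranking s).foldl (fun p it => p.setdefault it.2 it.1) d).get? t
      = ((d.get? t).or ((PySem.List.index? ranking t).map (fun k => s + (k : Int)))) := by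
  intro ranking
  induction ranking with
  | nil => intro s d; simp [PySem.List.enumerate_nil]
  | cons x xs ih =>
    intro s d
    rw [PySem.List.enumerate_cons, List.foldl_cons, ih]
    simp only
    by_cases hx : x = t
    · subst hx
      rw [PySem.Dict.get?_setdefault_self d x s, PySem.List.index?_cons_self]
      cases hd : d.get? x <;> simp [Option.or]
    · rw [PySem.Dict.get?_setdefault_of_ne d s (Ne.symm hx), PySem.List.index?_cons_of_ne xs hx]
      cases hi : PySem.List.index? xs t <;> cases hd : d.get? t <;> simp [Option.or] <;> ring

theorem pv_firstPos_getD (r : List String) (t : String) (ht : t ∈ r) :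
    (pvPosOf r).getD t 0 = ((pvIdx r t : Nat) : Int) := by
  unfold pvPosOf
  obtain ⟨k, hk⟩ := Option.isSome_iff_exists.mp ((PySem.List.index?_isSome_iff r t).mpr ht)
  simp [PySem.Dict.getD, pv_setdefault_fold, Option.or, pvIdx]
  rw [PySem.List.index?_eq_idxOf?] at hk
  simp [hk]

theorem pv_B_char (rankings : List (String × List String)) (team_names : List String)
    (hmem : ∀ lst ∈ (PySem.Dict.ofList rankings).values, ∀ t ∈ team_names, t ∈ lst) :
    getAllWins_alt rankings team_names
      = (PySem.List.dedup team_names).map (fun t =>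
          (t, PySem.Set.ofList ((PySem.List.dedup team_names).filter (fun u =>
                (!(u == t)) && decide (pvCnt rankings u t < pvCnt rankings t u))))) := by
  simp only [getAllWins_alt]
  set rd := PySem.Dict.ofList rankings with hrd
  set teams := PySem.List.dedup team_names with hteams
  have hndt : teams.Nodup := by rw [hteams]; exact PySem.List.nodup_dedup _
  set wins0 := (pvPairs teams).foldl (fun w pr => w.insert pr 0) PySem.Dict.empty with hw0
  set wins := rd.values.foldl (fun w ranking =>
      (pvPairs teams).foldl (fun w pr =>
        if (pvPosOf ranking).getD pr.1 0 < (pvPosOf ranking).getD pr.2 0 then w.modify pr 0 (· + 1) else w) w) wins0 with hwins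
  have hw0getD : ∀ k, wins0.getD k 0 = 0 := by
    intro k
    rw [hw0, pv_getD_foldl_insert_fun (fun _ => (0 : Nat))]
    by_cases h : k ∈ pvPairs teams <;> simp [h, PySem.Dict.getD_empty]
  have hwin : ∀ a b : String, a ∈ teams → b ∈ teams → a ≠ b →
      wins.getD (a, b) 0 = pvCnt rankings a b := by
    intro a b ha hb hab
    have ha' : a ∈ team_names := (PySem.List.mem_dedup _ _).mp (hteams ▸ ha)
    have hb' : b ∈ team_names := (PySem.List.mem_dedup _ _).mp (hteams ▸ hb)
    have h1 : (rd.values.map pvPosOf).foldl (fun (w : PySem.Dict (String × String) Nat) pos =>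
        (pvPairs teams).foldl (fun w pr =>
          if pos.getD pr.1 0 < pos.getD pr.2 0 then w.modify pr 0 (· + 1) else w) w) wins0
      = rd.values.foldl (fun w ranking =>
        (pvPairs teams).foldl (fun w pr =>
          if (pvPosOf ranking).getD pr.1 0 < (pvPosOf ranking).getD pr.2 0 then w.modify pr 0 (· + 1) else w) w) wins0 := List.foldl_map
    rw [hwins, ← h1,
      pv_wins_fold (pvPairs teams) (rd.values.map pvPosOf) wins0 (a, b), hw0getD, Nat.zero_add]
    rw [List.count_eq_one_of_mem (pv_nodup_pairs teams hndt)
      ((pv_mem_pairs teams (a, b)).mpr ⟨ha, hb, hab⟩), Nat.one_mul]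
    rw [List.countP_map]
    unfold pvCnt
    rw [← hrd]
    apply List.countP_congr
    intro r hr
    have hra : a ∈ r := hmem r (hrd ▸ hr) a ha'
    have hrb : b ∈ r := hmem r (hrd ▸ hr) b hb'
    simp only [Function.comp]
    rw [pv_firstPos_getD r a hra, pv_firstPos_getD r b hrb]
    simp [pvIdx]
  apply List.map_congr_left
  intro t ht
  have hfil : teams.filter (fun u => (!(u == t)) && decide (wins.getD (u, t) 0 < wins.getD (t, u) 0))
      = teams.filter (fun u => (!(u == t)) && decide (pvCnt rankings u t < pvCnt rankings t u)) := by
    apply List.filter_congr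
    intro u hu
    by_cases hut : u = t
    · simp [hut]
    · rw [hwin u t hu ht hut, hwin t u ht hu (fun h => hut h.symm)]
  rw [hfil]

-- the degenerate case: fewer than two distinct team names — no pair is ever compared
theorem pv_degenerate (rankings : List (String × List String)) (team_names : List String)
    (h : (PySem.List.dedup team_names).length ≤ 1) :
    getAllWins rankings team_names = getAllWins_alt rankings team_names := by
  rw [pv_A_char]
  simp only [getAllWins_alt]
  match hd : PySem.List.dedup team_names, h with
  | [], _ => simp
  | [x], _ =>
    have hall : ∀ u ∈ team_names, u = x := by
      intro u hu
      have hmem : u ∈ PySem.List.dedup team_names := (PySem.List.mem_dedup _ _).mpr hu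
      rw [hd] at hmem
      simpa using hmem
    have hfA : team_names.filter (fun u =>
        (!(x == u)) && (compareTeamPositions (PySem.Dict.ofList rankings) x u == x)) = [] := by
      rw [List.filter_eq_nil_iff]
      intro u hu
      rw [hall u hu]
      simp
    simp only [List.map_cons, List.map_nil]
    rw [hfA]
    simp

theorem pv_compare_vs_cnt (rankings : List (String × List String)) (t u : String) (hne : t ≠ u)
    (hD : ¬ (t = "Tie" ∧ pvCnt rankings t u = pvCnt rankings u t)) :
    (compareTeamPositions (PySem.Dict.ofList rankings) t u == t)
      = decide (pvCnt rankings u t < pvCnt rankings t u) := by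
  simp only [compareTeamPositions]
  rw [pv_c1_eq_pvCnt rankings t u, pv_c1_eq_pvCnt rankings u t]
  rcases Nat.lt_trichotomy (pvCnt rankings t u) (pvCnt rankings u t) with h | h | h
  · rw [if_neg (by omega), if_pos h]
    have h1 : (u == t) = false := by simp [Ne.symm hne]
    have h2 : decide (pvCnt rankings u t < pvCnt rankings t u) = false := by simp; omega
    rw [h1, h2]
  · have hTie : t ≠ "Tie" := fun heq => hD ⟨heq, h⟩
    rw [if_neg (by omega), if_neg (by omega)]
    have h1 : ("Tie" == t) = false := by simp [Ne.symm hTie]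
    have h2 : decide (pvCnt rankings u t < pvCnt rankings t u) = false := by simp; omega
    rw [h1, h2]
  · rw [if_pos h]
    simp
    omega

-- compare returns "Tie" on a level count
theorem pv_compare_tie (rankings : List (String × List String)) (t u : String)
    (hcnt : pvCnt rankings t u = pvCnt rankings u t) :
    compareTeamPositions (PySem.Dict.ofList rankings) t u = "Tie" := by
  simp only [compareTeamPositions]
  rw [pv_c1_eq_pvCnt rankings t u, pv_c1_eq_pvCnt rankings u t]
  rw [if_neg (by omega), if_neg (by omega)]

-- D_ forces at least two distinct team names, hence the non-degenerate branch of Pre_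
theorem pv_D_nondegen (rankings : List (String × List String)) (team_names : List String)
    (hPre : Pre_getAllWins rankings team_names) (hD : D_getAllWins rankings team_names) :
    ∀ lst ∈ (PySem.Dict.ofList rankings).values, ∀ t ∈ team_names, t ∈ lst := by
  obtain ⟨hT, u, hu, huT, _⟩ := hD
  rcases hPre with hlen | hmem
  · exfalso
    have h1 : "Tie" ∈ PySem.List.dedup team_names := (PySem.List.mem_dedup _ _).mpr hT
    have h2 : u ∈ PySem.List.dedup team_names := (PySem.List.mem_dedup _ _).mpr hu
    match hd : PySem.List.dedup team_names, hlen with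
    | [], _ => rw [hd] at h1; cases h1
    | [x], _ =>
      rw [hd] at h1 h2
      simp only [List.mem_singleton] at h1 h2
      exact huT (h2.trans h1.symm)
  · exact hmem

-- ===== VERDICT (by name: the statement is the Claim_ definition above) =====
theorem getAllWins_spec : Claim_unchanged_getAllWins := by
  intro rankings team_names hDom hPre hnD
  rcases hPre with hlen | hmem
  · exact pv_degenerate rankings team_names hlen
  rw [pv_A_char, pv_B_char rankings team_names hmem]
  apply List.map_congr_left
  intro t ht
  have ht' : t ∈ team_names := (PySem.List.mem_dedup _ _).mp ht
  have hA : PySem.Set.ofList (team_names.filter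
        (fun u => (!(t == u)) && (compareTeamPositions (PySem.Dict.ofList rankings) t u == t)))
      = (PySem.List.dedup team_names).filter
        (fun u => (!(t == u)) && (compareTeamPositions (PySem.Dict.ofList rankings) t u == t)) :=
    pv_ofList_filter _ _
  rw [hA, PySem.Set.ofList_eq_self_of_nodup _ ((PySem.List.nodup_dedup team_names).filter _)]
  congr 1
  apply List.filter_congr
  intro u hu
  have hu' : u ∈ team_names := (PySem.List.mem_dedup _ _).mp hu
  by_cases hut : u = t
  · simp [hut]
  · have h1 : (t == u) = false := by simp; exact fun h => hut h.symm
    have h2 : (u == t) = false := by simp [hut]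
    rw [h1, h2]
    simp only [Bool.not_false, Bool.true_and]
    apply pv_compare_vs_cnt rankings t u (fun h => hut h.symm)
    rintro ⟨rfl, hc⟩
    exact hnD ⟨ht', u, hu', hut, hc⟩

theorem getAllWins_changed : Claim_changed_getAllWins := by
  unfold Claim_changed_getAllWins; decide

theorem getAllWins_tight : Claim_exact_getAllWins := by
  intro rankings team_names hDom hPre hD heq
  have hmem := pv_D_nondegen rankings team_names hPre hD
  obtain ⟨hT, u, hu, huT, hcnt⟩ := hD
  rw [pv_A_char, pv_B_char rankings team_names hmem] at heq
  have h2 := List.map_inj_left.mp heq "Tie" ((PySem.List.mem_dedup _ _).mpr hT)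
  have hv := congrArg Prod.snd h2
  simp only at hv
  rw [pv_ofList_filter, PySem.Set.ofList_eq_self_of_nodup _
    ((PySem.List.nodup_dedup team_names).filter _)] at hv
  have hmemA : u ∈ (PySem.List.dedup team_names).filter
      (fun v => (!("Tie" == v)) && (compareTeamPositions (PySem.Dict.ofList rankings) "Tie" v == "Tie")) := by
    apply List.mem_filter.mpr
    refine ⟨(PySem.List.mem_dedup _ _).mpr hu, ?_⟩
    rw [pv_compare_tie rankings "Tie" u hcnt]
    have h1 : ("Tie" == u) = false := by simp [Ne.symm huT]
    rw [h1]
    simp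
  rw [hv] at hmemA
  have hcond := (List.mem_filter.mp hmemA).2
  have hlt : pvCnt rankings u "Tie" < pvCnt rankings "Tie" u := by
    simp only [Bool.and_eq_true, decide_eq_true_eq] at hcond
    exact hcond.2
  omega
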